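-- pv_equiv track=rewrite | github.com/utkuseyithanoglu/monthly-sales-analyzer-project | monthly_sales_analyzer.py | best_selling_day
-- ===== SOURCE A (Python) =====
-- def best_selling_day(data):
--     """Finds the day with the highest total sales."""
--     bestday=0
--     best=0
--     for i in data:
--         total=0
--         for a,b in i.items():
--             if a=="day":
--                 pass
--             else:
--                 total+=b
--         if total>best:
--             best=total
--             bestday=i['day']
--     return bestday
-- ===== SOURCE B (Python) =====
-- def best_selling_day(data):
--     """Finds the day with the highest total sales."""
--     totals = [sum(v for k, v in rec.items() if k != "day") for rec in data]
--     if not totals: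
--         return 0
--     m = max(totals)
--     if m <= 0:
--         return 0
--     return data[totals.index(m)]["day"]
-- ===== Notes on version B (the rewrite author's own statement) =====
-- stated objective: alternative
-- what changed: Replaces the single running-max fold carrying (best, bestday) state by a build-table-then-select shape: a totals list (one sum per record), then max() and .index() pick the first record attaining the positive maximum.
import Mathlib
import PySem

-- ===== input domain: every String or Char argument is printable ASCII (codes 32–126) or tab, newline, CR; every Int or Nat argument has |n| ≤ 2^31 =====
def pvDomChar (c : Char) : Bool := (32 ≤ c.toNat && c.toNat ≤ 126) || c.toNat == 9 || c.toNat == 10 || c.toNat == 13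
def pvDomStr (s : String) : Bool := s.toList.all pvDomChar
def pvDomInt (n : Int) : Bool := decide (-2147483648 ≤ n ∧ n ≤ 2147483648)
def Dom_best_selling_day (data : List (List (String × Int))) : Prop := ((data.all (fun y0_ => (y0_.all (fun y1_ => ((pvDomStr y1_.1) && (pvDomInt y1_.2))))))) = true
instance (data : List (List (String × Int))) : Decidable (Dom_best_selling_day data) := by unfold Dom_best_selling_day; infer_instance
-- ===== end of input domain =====

-- B replaces A's running-max fold carrying (bestday, best) state by a totals table followed
-- by max/index selection (objective: alternative decomposition, same asymptotic cost).

-- ===== PORT A =====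
-- A: one fold over the records carrying the state (bestday, best); the inner loop sums the
-- values whose key is not "day"; i['day'] (KeyError when the key is absent — those inputs are
-- excluded by Pre_) is ported as get? "day" with .getD 0 as the never-claimed placeholder.
def best_selling_day (data : List (List (String × Int))) : Int :=
  (data.foldl
    (fun (st : Int × Int) i =>
      let total := (PySem.Dict.ofList i).items.foldl
        (fun t p => if p.1 == "day" then t else t + p.2) 0
      if total > st.2 then (((PySem.Dict.ofList i).get? "day").getD 0, total) else st)
    (0, 0)).1

-- ===== PORT B =====
-- total of one record: sum(v for k, v in rec.items() if k != "day")
def recTotal (r : List (String × Int)) : Int :=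
  (((PySem.Dict.ofList r).items.filter (fun p => p.1 != "day")).map Prod.snd).sum

-- B: totals table, then max() / .index() selection; the 'if not totals' guard is the none
-- branch of max?, and rec['day'] on the selected record is get? with the same placeholder.
def best_selling_day_alt (data : List (List (String × Int))) : Int :=
  let totals := data.map recTotal
  match PySem.List.max? totals (fun x => x) with
  | none => 0
  | some m =>
    if m ≤ 0 then 0
    else
      match PySem.List.index? totals m with
      | none => 0
      | some i =>
        match PySem.List.pyGet? data (i : Int) with
        | none => 0
        | some rec => ((PySem.Dict.ofList rec).get? "day").getD 0

-- ===== PRECONDITION & SPEC =====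
-- Pre_ excludes exactly the inputs on which the Python A raises KeyError: those where some
-- record whose non-'day' total is positive and strictly exceeds every earlier record's total
-- (A's update trigger) has no 'day' key.
def Pre_best_selling_day (data : List (List (String × Int))) : Prop :=
  ∀ j < data.length,
    (0 < recTotal (data.getD j []) ∧
      ∀ k < j, recTotal (data.getD k []) < recTotal (data.getD j [])) →
    (PySem.Dict.ofList (data.getD j [])).contains "day" = true

instance (data : List (List (String × Int))) : Decidable (Pre_best_selling_day data) := by
  unfold Pre_best_selling_day; infer_instance

def pvWitness_best_selling_day : (List (List (String × Int))) := [[("day", 1), ("x", 5)]]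

def Spec_best_selling_day (data : List (List (String × Int))) (out : Int) : Prop := out = best_selling_day_alt data
instance (data : List (List (String × Int))) (out : Int) : Decidable (Spec_best_selling_day data out) := by unfold Spec_best_selling_day; infer_instance

-- ===== CLAIM (what is proved, stated in full; the proofs are below) =====
def Claim_equal_best_selling_day : Prop := ∀ (data : List (List (String × Int))), Dom_best_selling_day data → Pre_best_selling_day data → Spec_best_selling_day data (best_selling_day data)

-- ===== LEMMAS AND PROOFS =====

-- A's inner accumulation loop computes recTotal (shifted by the accumulator).
lemma inner_foldl_eq (l : List (String × Int)) (c : Int) :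
    l.foldl (fun t p => if p.1 == "day" then t else t + p.2) c
      = c + ((l.filter (fun p => p.1 != "day")).map Prod.snd).sum := by
  induction l generalizing c with
  | nil => simp
  | cons p l ih =>
    rw [List.foldl_cons, List.filter_cons, ih]
    cases h : p.1 == "day"
    · have h' : p.1 ≠ "day" := by simpa using h
      simp [h', add_assoc]
    · have h' : p.1 = "day" := by simpa using h
      simp [h']

-- the A-side loop body, named so the characterisation below can speak about it
def stepA (st : Int × Int) (i : List (String × Int)) : Int × Int :=
  let total := (PySem.Dict.ofList i).items.foldl
    (fun t p => if p.1 == "day" then t else t + p.2) 0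
  if total > st.2 then (((PySem.Dict.ofList i).get? "day").getD 0, total) else st

lemma stepA_eq (st : Int × Int) (i : List (String × Int)) :
    stepA st i = if recTotal i > st.2
      then (((PySem.Dict.ofList i).get? "day").getD 0, recTotal i) else st := by
  unfold stepA recTotal
  rw [inner_foldl_eq]
  simp

lemma foldl_max_shift (ts : List Int) : ∀ a b : Int,
    ts.foldl max (max a b) = max a (ts.foldl max b) := by
  induction ts with
  | nil => intro a b; rfl
  | cons t ts ih =>
    intro a b
    simp only [List.foldl_cons]
    rw [max_assoc, ih]

-- Characterisation of A's fold: its day component is the 'day' of the first record whose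
-- total attains the maximum of the totals, provided that maximum exceeds the incoming best.
lemma foldA_char : ∀ (l : List (List (String × Int))) (d b : Int),
    (l.foldl stepA (d, b)).1 =
      match PySem.List.max? (l.map recTotal) (fun x => x) with
      | none => d
      | some m =>
        if m ≤ b then d
        else
          match PySem.List.index? (l.map recTotal) m with
          | none => d
          | some i => ((PySem.Dict.ofList (l.getD i [])).get? "day").getD 0 := by
  intro l
  induction l with
  | nil => intro d b; rfl
  | cons r l ih =>
    intro d b
    rw [List.foldl_cons, stepA_eq, List.map_cons, PySem.List.max?_id_cons]
    by_cases hb : recTotal r > b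
    · rw [if_pos hb, ih]
      cases hts : l.map recTotal with
      | nil =>
        have h0 := PySem.List.index?_cons_self (recTotal r) ([] : List Int)
        rw [PySem.List.index?_eq_idxOf?] at h0
        have hnone : PySem.List.max? ([] : List Int) (fun x => x) = none := rfl
        rw [List.foldl_nil]
        simp [not_le.mpr hb, h0, hnone]
      | cons t' ts' =>
        rw [PySem.List.max?_id_cons, List.foldl_cons, foldl_max_shift]
        set m' := ts'.foldl max t' with hm'
        have hmem : m' ∈ t' :: ts' := PySem.List.max?_mem (by rw [PySem.List.max?_id_cons])
        by_cases hm : m' ≤ recTotal r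
        · rw [max_eq_left hm]
          have h0 := PySem.List.index?_cons_self (recTotal r) (t' :: ts')
          rw [PySem.List.index?_eq_idxOf?] at h0
          simp [hm, not_le.mpr hb, h0]
        · rw [not_le] at hm
          rw [max_eq_right (le_of_lt hm)]
          have hne : recTotal r ≠ m' := ne_of_lt hm
          obtain ⟨i, hi⟩ : ∃ i, PySem.List.index? (t' :: ts') m' = some i :=
            Option.isSome_iff_exists.mp
              ((PySem.List.index?_isSome_iff (xs := t' :: ts') (v := m')).mpr hmem)
          have hc : PySem.List.index? (recTotal r :: t' :: ts') m' = some (i + 1) := by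
            rw [PySem.List.index?_cons_of_ne _ hne, hi]; rfl
          rw [PySem.List.index?_eq_idxOf?] at hi hc
          simp [not_le.mpr hm, not_le.mpr (lt_trans hb hm), hi, hc]
    · rw [if_neg hb, ih]
      rw [not_lt] at hb
      cases hts : l.map recTotal with
      | nil =>
        have hnone : PySem.List.max? ([] : List Int) (fun x => x) = none := rfl
        rw [List.foldl_nil]
        simp [hb, hnone]
      | cons t' ts' =>
        rw [PySem.List.max?_id_cons, List.foldl_cons, foldl_max_shift]
        set m' := ts'.foldl max t' with hm'
        have hmem : m' ∈ t' :: ts' := PySem.List.max?_mem (by rw [PySem.List.max?_id_cons])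
        by_cases hm : m' ≤ b
        · simp [hm, hb]
        · rw [not_le] at hm
          have htm : recTotal r < m' := lt_of_le_of_lt hb hm
          rw [max_eq_right (le_of_lt htm)]
          have hne : recTotal r ≠ m' := ne_of_lt htm
          obtain ⟨i, hi⟩ : ∃ i, PySem.List.index? (t' :: ts') m' = some i :=
            Option.isSome_iff_exists.mp
              ((PySem.List.index?_isSome_iff (xs := t' :: ts') (v := m')).mpr hmem)
          have hc : PySem.List.index? (recTotal r :: t' :: ts') m' = some (i + 1) := by
            rw [PySem.List.index?_cons_of_ne _ hne, hi]; rfl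
          rw [PySem.List.index?_eq_idxOf?] at hi hc
          simp [not_le.mpr hm, hi, hc]

lemma ports_agree (data : List (List (String × Int))) :
    best_selling_day data = best_selling_day_alt data := by
  have hA : best_selling_day data = (data.foldl stepA (0, 0)).1 := rfl
  rw [hA, foldA_char]
  unfold best_selling_day_alt
  cases hmax : PySem.List.max? (data.map recTotal) (fun x => x) with
  | none => simp only [hmax]
  | some m =>
    simp only [hmax]
    by_cases hm0 : m ≤ 0
    · simp [hm0]
    · simp only [if_neg hm0]
      cases hidx : PySem.List.index? (data.map recTotal) m with
      | none => rfl
      | some i =>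
        simp only []
        have hlen : i < data.length := by
          obtain ⟨hk, -, -⟩ := PySem.List.getElem_of_index?_eq_some hidx
          simpa using hk
        have hget : PySem.List.pyGet? data ((i : Nat) : Int) = some data[i] := by
          rw [PySem.List.pyGet?_natCast]
          exact List.getElem?_eq_getElem hlen
        rw [hget]
        rw [List.getD_eq_getElem data [] hlen]

-- ===== VERDICT (by name: the statement is the Claim_ definition above) =====
theorem best_selling_day_spec : Claim_equal_best_selling_day := by
  intro data _ _
  exact ports_agree data
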